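-- pv_equiv track=rewrite | github.com/kkujawinski/django-offermaker | offermaker/core.py | _sum_restrictions
-- ===== SOURCE A (Python) =====
-- def _sum_restrictions(restrictions_groups):
--     output = {}
--     for restrictions in restrictions_groups:
--         for name, restriction in restrictions.items():
--             if name in output:
--                 output[name] += restriction
--             else:
--                 output[name] = restriction
--     return output
-- ===== SOURCE B (Python) =====
-- def _sum_restrictions(restrictions_groups):
--     # Phase 1: group every restriction value under its name, in first-seen order.
--     grouped = {}
--     for restrictions in restrictions_groups:
--         for name, restriction in restrictions.items():
--             grouped.setdefault(name, []).append(restriction)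
--     # Phase 2: reduce each name's list with += (same in-place semantics as A).
--     output = {}
--     for name, values in grouped.items():
--         acc = values[0]
--         for v in values[1:]:
--             acc += v
--         output[name] = acc
--     return output
-- ===== Notes on version B (the rewrite author's own statement) =====
-- stated objective: alternative
-- what changed: B replaces A's interleaved accumulate-as-you-go dict with a two-phase group-then-reduce: first a name -> list-of-restriction-lists grouping dict, then a separate reduction pass folding each list with += into the final value.
import Mathlib
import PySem

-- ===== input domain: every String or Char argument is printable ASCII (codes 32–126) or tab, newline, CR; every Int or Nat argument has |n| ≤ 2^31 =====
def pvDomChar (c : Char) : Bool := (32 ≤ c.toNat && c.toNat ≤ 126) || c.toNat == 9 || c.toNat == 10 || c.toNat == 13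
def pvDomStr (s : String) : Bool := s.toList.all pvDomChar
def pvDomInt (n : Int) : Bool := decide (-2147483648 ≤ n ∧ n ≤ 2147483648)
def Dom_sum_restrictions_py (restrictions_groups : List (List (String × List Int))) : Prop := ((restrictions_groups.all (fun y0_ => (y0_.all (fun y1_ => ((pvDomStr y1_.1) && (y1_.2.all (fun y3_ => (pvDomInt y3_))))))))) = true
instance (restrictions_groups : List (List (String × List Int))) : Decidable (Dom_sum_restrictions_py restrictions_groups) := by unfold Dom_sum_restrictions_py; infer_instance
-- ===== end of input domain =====

-- B changes A's interleaved accumulation into a two-phase group-then-reduce pass (alternative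
-- decomposition, same return value); both Pythons mutate the input restriction lists in place via
-- '+=' identically — the theorems here are about the return value.

-- ===== PORT A =====
-- 'name in output' → contains; 'output[name] += restriction' → insert of getD ++ restriction
def sum_restrictions_py (restrictions_groups : List (List (String × List Int))) : List (String × List Int) :=
  (restrictions_groups.foldl
    (fun output restrictions =>
      restrictions.foldl
        (fun output p =>
          if output.contains p.1 then output.insert p.1 (output.getD p.1 [] ++ p.2)
          else output.insert p.1 p.2)
        output)
    PySem.Dict.empty).items

-- ===== PORT B =====
-- phase 1: grouped.setdefault(name, []).append(restriction) → Dict.modify name [] (· ++ [restriction]) (exact);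
-- phase 2: Source B fills a fresh output dict in grouped's key order (distinct keys), i.e. maps over grouped.items;
--          'acc = values[0]; for v in values[1:]: acc += v' → the match + foldl below.
def sum_restrictions_py_alt (restrictions_groups : List (List (String × List Int))) : List (String × List Int) :=
  let grouped : PySem.Dict String (List (List Int)) :=
    restrictions_groups.foldl
      (fun grouped restrictions =>
        restrictions.foldl (fun grouped p => grouped.modify p.1 [] (· ++ [p.2])) grouped)
      PySem.Dict.empty
  grouped.items.map (fun kv =>
    (kv.1, match kv.2 with
           | [] => []
           | h :: t => t.foldl (· ++ ·) h))

-- ===== PRECONDITION & SPEC =====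
def Spec_sum_restrictions_py (restrictions_groups : List (List (String × List Int))) (out : List (String × List Int)) : Prop := out = sum_restrictions_py_alt restrictions_groups
instance (restrictions_groups : List (List (String × List Int))) (out : List (String × List Int)) : Decidable (Spec_sum_restrictions_py restrictions_groups out) := by unfold Spec_sum_restrictions_py; infer_instance

-- ===== CLAIM (what is proved, stated in full; the proofs are below) =====
def Claim_equal_sum_restrictions_py : Prop := ∀ (restrictions_groups : List (List (String × List Int))), Dom_sum_restrictions_py restrictions_groups → Spec_sum_restrictions_py restrictions_groups (sum_restrictions_py restrictions_groups)

-- ===== LEMMAS AND PROOFS =====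

-- A's if-branch step is one unconditional insert: when the key is absent, getD is [].
lemma stepA_eq (output : PySem.Dict String (List Int)) (p : String × List Int) :
    (if output.contains p.1 then output.insert p.1 (output.getD p.1 [] ++ p.2)
     else output.insert p.1 p.2)
    = output.insert p.1 (output.getD p.1 [] ++ p.2) := by
  by_cases h : output.contains p.1 = true
  · simp [h]
  · simp [h, PySem.Dict.getD_of_not_contains output [] (by simpa using h)]

-- A's accumulated value at a key: the concatenation of all its restrictions so far.
lemma getD_foldA (l : List (String × List Int)) (d : PySem.Dict String (List Int)) (c : String) :
    (l.foldl (fun output p => output.insert p.1 (output.getD p.1 [] ++ p.2)) d).getD c []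
    = d.getD c [] ++ ((l.filter (fun p => p.1 == c)).map (·.2)).flatten := by
  induction l generalizing d with
  | nil => simp
  | cons p t ih =>
    simp only [List.foldl_cons, ih, PySem.Dict.getD_insert, List.filter_cons]
    by_cases hc : c = p.1
    · simp [hc, List.append_assoc]
    · have : (p.1 == c) = false := by simp [Ne.symm hc]
      simp [hc, this]

-- the reduction of B's phase 2 is flatten
lemma reduce_eq_flatten (vs : List (List Int)) :
    (match vs with
     | [] => ([] : List Int)
     | h :: t => t.foldl (· ++ ·) h) = vs.flatten := by
  cases vs with
  | nil => rfl
  | cons h t =>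
    have := PySem.List.foldl_append_eq_flatMap (fun x => x) t h
    simpa using this

theorem sum_restrictions_py_eq_alt (gs : List (List (String × List Int))) :
    sum_restrictions_py gs = sum_restrictions_py_alt gs := by
  unfold sum_restrictions_py sum_restrictions_py_alt
  dsimp only
  have hstep :
      (fun (output : PySem.Dict String (List Int)) (p : String × List Int) =>
        if output.contains p.1 then output.insert p.1 (output.getD p.1 [] ++ p.2)
        else output.insert p.1 p.2)
      = (fun output p => output.insert p.1 (output.getD p.1 [] ++ p.2)) := by
    funext output p; exact stepA_eq output p
  rw [hstep]
  rw [show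
      (gs.foldl (fun output restrictions =>
        restrictions.foldl (fun output p => output.insert p.1 (output.getD p.1 [] ++ p.2)) output)
        PySem.Dict.empty)
      = (gs.flatten.foldl (fun output p => output.insert p.1 (output.getD p.1 [] ++ p.2))
          PySem.Dict.empty) from (List.foldl_flatten).symm]
  rw [show
      (gs.foldl (fun grouped restrictions =>
        restrictions.foldl (fun grouped p => grouped.modify p.1 [] (· ++ [p.2])) grouped)
        PySem.Dict.empty)
      = (gs.flatten.foldl (fun grouped p => grouped.modify p.1 [] (· ++ [p.2]))
          PySem.Dict.empty) from (List.foldl_flatten).symm]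
  set ps := gs.flatten with hps
  have hndA : (ps.foldl (fun output p => output.insert p.1 (output.getD p.1 [] ++ p.2))
      PySem.Dict.empty).keys.Nodup :=
    PySem.Dict.nodup_keys_foldl_insert_key ps (·.1)
      (fun d p => d.getD p.1 [] ++ p.2) PySem.Dict.empty (by simp)
  have hndB : (ps.foldl (fun grouped p => grouped.modify p.1 [] (· ++ [p.2]))
      PySem.Dict.empty).keys.Nodup :=
    PySem.Dict.nodup_keys_foldl_modify_key ps (·.1) []
      (fun _ p vs => vs ++ [p.2]) PySem.Dict.empty (by simp)
  rw [PySem.Dict.items_eq_map_keys _ hndA [], PySem.Dict.items_eq_map_keys _ hndB []]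
  rw [PySem.Dict.keys_foldl_insert_key ps (·.1) (fun d p => d.getD p.1 [] ++ p.2) PySem.Dict.empty]
  rw [PySem.Dict.keys_foldl_modify_key ps (·.1) [] (fun _ p vs => vs ++ [p.2]) PySem.Dict.empty]
  rw [List.map_map]
  apply List.map_congr_left
  intro k _
  simp only [Function.comp]
  rw [reduce_eq_flatten, getD_foldA, PySem.Dict.getD_foldl_modify_append]
  simp

-- ===== VERDICT (by name: the statement is the Claim_ definition above) =====
theorem sum_restrictions_py_spec : Claim_equal_sum_restrictions_py := by
  intro gs _
  unfold Spec_sum_restrictions_py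
  exact sum_restrictions_py_eq_alt gs
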